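-- pv_equiv track=rewrite | github.com/Yungblyat/SummarEase | ParticipantEngagement_SentimentAnalysis/views.py | calculate_interruption_frequency
-- ===== SOURCE A (Python) =====
-- from collections import defaultdict
-- from collections import defaultdict
--
-- def calculate_interruption_frequency(diarization_content):
--     interruptions = defaultdict(lambda: defaultdict(int))
--     previous_speaker = None
--
--     for segment in diarization_content["segments"]:
--         speaker = segment.get("speaker", "Unknown")
--
--         # Skip "Unknown" speakers if you want to ignore them in interruption calculation
--         if speaker == "Unknown":
--             continue
--
--         if previous_speaker and previous_speaker != speaker:
--             interruptions[previous_speaker][speaker] += 1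
--
--         previous_speaker = speaker
--
--     # Optionally handle interruptions involving "Unknown" speakers
--     if "Unknown" in interruptions:
--         unknown_interruptions = interruptions["Unknown"]
--         interruptions["Unknown"] = dict(unknown_interruptions)
--
--     return {speaker: dict(interrupted_speakers) for speaker, interrupted_speakers in interruptions.items()}
-- ===== SOURCE B (Python) =====
-- from collections import Counter
--
-- def calculate_interruption_frequency(diarization_content):
--     # Stage 1: the speaker labels, with unknowns removed.
--     labels = [seg.get("speaker", "Unknown") for seg in diarization_content["segments"]]
--     seq = [s for s in labels if s != "Unknown"]
--     # Stage 2: run-length compress; each adjacent pair of runs is one interruption edge.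
--     runs = seq[:1] + [s for prev, s in zip(seq, seq[1:]) if prev != s]
--     edges = list(zip(runs, runs[1:]))
--     # Stage 3: total multiplicity of every edge at once, then assemble the nested
--     # dict, outer and inner keys in first-occurrence order.
--     totals = Counter(edges)
--     result = {}
--     for p, c in edges:
--         result.setdefault(p, {})[c] = totals[(p, c)]
--     return result
-- ===== Notes on version B (the rewrite author's own statement) =====
-- stated objective: alternative
-- what changed: Replaces A's single stateful loop with per-edge nested-defaultdict increments by a staged pipeline over different intermediate data: filter labels, run-length-compress them, materialise the list of run-boundary edges, take each edge's total multiplicity from one flat Counter keyed by (prev, cur) pairs, and assemble the nested dict in a separate pass that writes final totals (never increments); A's None sentinel, inequality test in the counting loop and dead 'Unknown' block disappear.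
-- intended difference: On inputs where some segment's speaker label is the empty string '' followed (among non-Unknown labels) by a label other than '' and 'Unknown', A's guard 'previous_speaker and ...' treats '' as falsy and silently drops every transition out of '', so A never reports '' as an interrupting speaker; B counts such transitions like any other speaker change, which is intended since '' is an ordinary label, not absence of a speaker. — e.g. on calculate_interruption_frequency([("segments", [[("speaker", "")], [("speaker", "A")]])]): A returns [], B returns [("", [("A", 1)])]
import Mathlib
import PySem

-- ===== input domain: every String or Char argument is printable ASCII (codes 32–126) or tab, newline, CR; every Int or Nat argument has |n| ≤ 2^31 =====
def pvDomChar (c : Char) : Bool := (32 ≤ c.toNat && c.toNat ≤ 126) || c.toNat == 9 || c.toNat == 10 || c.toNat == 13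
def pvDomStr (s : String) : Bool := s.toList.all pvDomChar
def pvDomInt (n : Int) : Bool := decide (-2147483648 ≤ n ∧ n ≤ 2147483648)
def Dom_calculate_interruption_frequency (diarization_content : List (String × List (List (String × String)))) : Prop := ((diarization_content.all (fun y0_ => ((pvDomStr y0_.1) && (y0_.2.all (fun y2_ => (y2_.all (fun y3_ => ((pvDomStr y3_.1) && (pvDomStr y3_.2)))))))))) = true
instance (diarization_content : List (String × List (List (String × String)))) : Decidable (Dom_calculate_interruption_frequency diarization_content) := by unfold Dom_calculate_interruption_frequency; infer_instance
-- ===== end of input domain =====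

-- B replaces A's single stateful counting loop by a staged pipeline (filter labels,
-- run-length-compress, list the run-boundary edges, total each edge via one flat Counter,
-- assemble the nested dict in a separate pass); B also counts transitions out of an
-- empty-string speaker, which A drops by truthiness (see D_ below).

-- ===== PORT A =====
-- one loop step of A: state = (interruptions, previous_speaker)
def pvAStep (st : PySem.Dict String (PySem.Dict String Int) × Option String)
    (segment : List (String × String)) :
    PySem.Dict String (PySem.Dict String Int) × Option String :=
  let speaker := (PySem.Dict.mk segment).getD "speaker" "Unknown"
  if speaker = "Unknown" then st
  else
    let d :=
      match st.2 with
      | none => st.1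
      | some p =>
        -- 'if previous_speaker and previous_speaker != speaker': '' is falsy
        if p ≠ "" ∧ p ≠ speaker then
          st.1.modify p PySem.Dict.empty (fun inner => inner.modify speaker 0 (· + 1))
        else st.1
    (d, some speaker)

def calculate_interruption_frequency (diarization_content : List (String × List (List (String × String)))) : List (String × List (String × Int)) :=
  match (PySem.Dict.mk diarization_content).get? "segments" with
  | none => []  -- Python raises KeyError here; excluded by Pre_
  | some segments =>
    let st := segments.foldl pvAStep (PySem.Dict.empty, none)
    let interruptions :=
      match st.1.get? "Unknown" with
      | some unknown_interruptions => st.1.insert "Unknown" unknown_interruptions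
      | none => st.1
    interruptions.items.map (fun p => (p.1, p.2.items))

-- ===== PORT B =====
def calculate_interruption_frequency_alt (diarization_content : List (String × List (List (String × String)))) : List (String × List (String × Int)) :=
  match (PySem.Dict.mk diarization_content).get? "segments" with
  | none => []  -- Python raises KeyError here; excluded by Pre_
  | some segments =>
    -- Stage 1: labels, minus unknowns
    let labels := segments.map (fun seg => (PySem.Dict.mk seg).getD "speaker" "Unknown")
    let seq := labels.filter (fun s => s != "Unknown")
    -- Stage 2: run-length compression; adjacent runs are the interruption edges
    let runs := seq.take 1 ++ ((seq.zip (seq.drop 1)).filter (fun e => e.1 != e.2)).map (·.2)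
    let edges := runs.zip (runs.drop 1)
    -- Stage 3: flat Counter of edges, then assemble the nested dict
    let totals := PySem.Dict.counter edges
    let res := edges.foldl
      (fun d e => d.insert e.1 ((d.getD e.1 PySem.Dict.empty).insert e.2 (totals.getD e 0)))
      PySem.Dict.empty
    res.items.map (fun p => (p.1, p.2.items))

-- ===== PRECONDITION & SPEC =====
-- Pre_ excludes exactly the inputs whose top-level dict has no "segments" key: there the Python A
-- (and B) raises KeyError.
def Pre_calculate_interruption_frequency (diarization_content : List (String × List (List (String × String)))) : Prop :=
  ((PySem.Dict.mk diarization_content).get? "segments").isSome = true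
instance (diarization_content : List (String × List (List (String × String)))) : Decidable (Pre_calculate_interruption_frequency diarization_content) := by unfold Pre_calculate_interruption_frequency; infer_instance
def pvWitness_calculate_interruption_frequency : (List (String × List (List (String × String)))) :=
  [("segments", [[("speaker", "A")], [("speaker", "B")]])]

-- On inputs where some segment's speaker label is "" and the next non-Unknown label after it is
-- non-empty, A returns a result that never counts that transition out of "" (the guard
-- 'previous_speaker and …' treats "" as falsy), while B counts it like any other speaker change,
-- which is intended: "" is an ordinary label, not absence of a speaker.
def D_calculate_interruption_frequency (diarization_content : List (String × List (List (String × String)))) : Prop :=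
  ∃ kv ∈ diarization_content.find? (·.1 == "segments"),
    ∃ y ∈ ((kv.2.map (fun seg => (List.lookup "speaker" seg).getD "Unknown")).dropWhile
      (· != "")).tail, y ≠ "" ∧ y ≠ "Unknown"
instance (diarization_content : List (String × List (List (String × String)))) : Decidable (D_calculate_interruption_frequency diarization_content) := by unfold D_calculate_interruption_frequency; infer_instance

def Spec_calculate_interruption_frequency (diarization_content : List (String × List (List (String × String)))) (out : List (String × List (String × Int))) : Prop := ¬ D_calculate_interruption_frequency diarization_content → out = calculate_interruption_frequency_alt diarization_content
instance (diarization_content : List (String × List (List (String × String)))) (out : List (String × List (String × Int))) : Decidable (Spec_calculate_interruption_frequency diarization_content out) := by unfold Spec_calculate_interruption_frequency; infer_instance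

def pvDiffWitness_calculate_interruption_frequency : (List (String × List (List (String × String)))) :=
  [("segments", [[("speaker", "")], [("speaker", "A")]])]
def pvDiffWitnessOut_calculate_interruption_frequency : (List (String × List (String × Int))) × (List (String × List (String × Int))) :=
  ([], [("", [("A", 1)])])

-- ===== CLAIM =====
def Claim_unchanged_calculate_interruption_frequency : Prop := ∀ (diarization_content : List (String × List (List (String × String)))), Dom_calculate_interruption_frequency diarization_content → Pre_calculate_interruption_frequency diarization_content → Spec_calculate_interruption_frequency diarization_content (calculate_interruption_frequency diarization_content)
def Claim_changed_calculate_interruption_frequency : Prop := Dom_calculate_interruption_frequency (pvDiffWitness_calculate_interruption_frequency) ∧ Pre_calculate_interruption_frequency (pvDiffWitness_calculate_interruption_frequency) ∧ D_calculate_interruption_frequency (pvDiffWitness_calculate_interruption_frequency) ∧ calculate_interruption_frequency (pvDiffWitness_calculate_interruption_frequency) = pvDiffWitnessOut_calculate_interruption_frequency.1 ∧ calculate_interruption_frequency_alt (pvDiffWitness_calculate_interruption_frequency) = pvDiffWitnessOut_calculate_interruption_frequency.2 ∧ pvDiffWitnessOut_calculate_interruption_frequency.1 ≠ pvDiffWi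tnessOut_calculate_interruption_frequency.2

def Claim_exact_calculate_interruption_frequency : Prop := ∀ (diarization_content : List (String × List (List (String × String)))), Dom_calculate_interruption_frequency diarization_content → Pre_calculate_interruption_frequency diarization_content → D_calculate_interruption_frequency diarization_content → calculate_interruption_frequency diarization_content ≠ calculate_interruption_frequency_alt diarization_content

-- ===== LEMMAS AND PROOFS =====

-- proof-side: the speaker label of a segment (first-match lookup with default "Unknown")
def pvSpk (seg : List (String × String)) : String :=
  ((seg.find? (·.1 == "speaker")).map (·.2)).getD "Unknown"

lemma pvLookup_eq (seg : List (String × String)) :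
    (List.lookup "speaker" seg).getD "Unknown" = pvSpk seg := by
  induction seg with
  | nil => rfl
  | cons kv rest ih =>
    obtain ⟨k, v⟩ := kv
    by_cases h : k = "speaker"
    · subst h
      simp [List.lookup, pvSpk]
    · have h1 : ("speaker" == k) = false := by simp [Ne.symm h]
      have h2 : (k == "speaker") = false := by simp [h]
      simp only [pvSpk] at ih
      simp [List.lookup, pvSpk, h1, h2, ih]

lemma pvMapLookup_eq (l : List (List (String × String))) :
    l.map (fun seg => (List.lookup "speaker" seg).getD "Unknown") = l.map pvSpk :=
  List.map_congr_left (fun s _ => pvLookup_eq s)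

-- proof-side helpers: the increment A performs for a counted transition p -> c
def pvBump (d : PySem.Dict String (PySem.Dict String Int)) (p c : String) :
    PySem.Dict String (PySem.Dict String Int) :=
  let inner := d.getD p PySem.Dict.empty
  d.insert p (inner.insert c (inner.getD c 0 + 1))

def pvBumpE (d : PySem.Dict String (PySem.Dict String Int)) (e : String × String) :
    PySem.Dict String (PySem.Dict String Int) :=
  pvBump d e.1 e.2

-- B's assembly step, with a general value function
def pvAsgF (v : String × String → Int)
    (d : PySem.Dict String (PySem.Dict String Int)) (e : String × String) :
    PySem.Dict String (PySem.Dict String Int) :=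
  d.insert e.1 ((d.getD e.1 PySem.Dict.empty).insert e.2 (v e))

-- A's loop, rephrased on the filtered label sequence (guard keeps A's '' truthiness test)
def pvACnt : String → List String → PySem.Dict String (PySem.Dict String Int) →
    PySem.Dict String (PySem.Dict String Int) × String
  | p, [], d => (d, p)
  | p, c :: rest, d => pvACnt c rest (if p ≠ "" ∧ p ≠ c then pvBump d p c else d)

-- intermediate: incremental counting over adjacent labels (proof-side only)
def pvBCnt : String → List String → PySem.Dict String (PySem.Dict String Int) →
    PySem.Dict String (PySem.Dict String Int)
  | _, [], d => d
  | p, c :: rest, d => pvBCnt c rest (if p ≠ c then pvBump d p c else d)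

def pvSeqOf (segs : List (List (String × String))) : List String :=
  (segs.filter (fun seg => pvSpk seg != "Unknown")).map pvSpk

def pvDiffPairs (l : List String) : List (String × String) :=
  (l.zip (l.drop 1)).filter (fun e => e.1 != e.2)

def pvRunsOf (l : List String) : List String :=
  l.take 1 ++ (pvDiffPairs l).map (·.2)

lemma pvDGet_eq_find? {α : Type} (seg : List (String × α)) (key : String) :
    (PySem.Dict.mk seg).get? key = (seg.find? (fun kv => kv.1 == key)).map (·.2) := by
  induction seg with
  | nil => rfl
  | cons kv rest ih =>
    obtain ⟨k, v⟩ := kv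
    rw [PySem.Dict.get?_mk_cons, List.find?_cons]
    by_cases h : (k == key) = true
    · simp [h]
    · simp only [Bool.not_eq_true] at h
      simp [h, ih]

lemma pvSpk_eq (seg : List (String × String)) :
    pvSpk seg = (PySem.Dict.mk seg).getD "speaker" "Unknown" := by
  rw [PySem.Dict.getD_eq_get?_getD, pvDGet_eq_find? seg "speaker", pvSpk]

-- proof-side restatement of the D_ pattern as a recursive predicate over the labels
def pvDNextKnownNonempty : List String → Bool
  | [] => false
  | b :: rest => if b == "Unknown" then pvDNextKnownNonempty rest else b != ""

def pvDBad : List String → Bool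
  | [] => false
  | a :: rest => (a == "" && pvDNextKnownNonempty rest) || pvDBad rest

lemma pvDNext_or_bad (r : List String) :
    (pvDNextKnownNonempty r || pvDBad r) = true ↔ ∃ y ∈ r, y ≠ "" ∧ y ≠ "Unknown" := by
  induction r with
  | nil => simp [pvDNextKnownNonempty, pvDBad]
  | cons b r' ih =>
    by_cases hu : b = "Unknown"
    · simp [pvDNextKnownNonempty, pvDBad, hu, ← ih]
    · by_cases he : b = ""
      · simp [pvDNextKnownNonempty, pvDBad, he, ← ih]
      · simp [pvDNextKnownNonempty, pvDBad, hu, he]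

lemma pvDBad_iff (L : List String) :
    pvDBad L = true ↔ ∃ y ∈ (L.dropWhile (fun s => s != "")).tail, y ≠ "" ∧ y ≠ "Unknown" := by
  induction L with
  | nil => simp [pvDBad]
  | cons a r ih =>
    by_cases he : a = ""
    · rw [List.dropWhile_cons_of_neg (by simp [he])]
      rw [show pvDBad (a :: r) = (pvDNextKnownNonempty r || pvDBad r) by simp [pvDBad, he]]
      simpa using pvDNext_or_bad r
    · rw [List.dropWhile_cons_of_pos (by simp [he])]
      rw [show pvDBad (a :: r) = pvDBad r by simp [pvDBad, he]]
      exact ih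

lemma pvSeqOf_cons_unknown {seg : List (String × String)} {rest : List (List (String × String))}
    (h : pvSpk seg = "Unknown") : pvSeqOf (seg :: rest) = pvSeqOf rest := by
  simp [pvSeqOf, h]

lemma pvSeqOf_cons_known {seg : List (String × String)} {rest : List (List (String × String))}
    (h : pvSpk seg ≠ "Unknown") : pvSeqOf (seg :: rest) = pvSpk seg :: pvSeqOf rest := by
  simp [pvSeqOf, h]

lemma pvAStep_eq (st : PySem.Dict String (PySem.Dict String Int) × Option String)
    (seg : List (String × String)) :
    pvAStep st seg =
      if pvSpk seg = "Unknown" then st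
      else ((match st.2 with
             | none => st.1
             | some p => if p ≠ "" ∧ p ≠ pvSpk seg then pvBump st.1 p (pvSpk seg) else st.1),
            some (pvSpk seg)) := by
  rw [pvSpk_eq]; rfl

-- A's fold over the segments equals pvACnt over the filtered labels
lemma pvA_fold_some (segs : List (List (String × String))) :
    ∀ (d : PySem.Dict String (PySem.Dict String Int)) (p : String),
      segs.foldl pvAStep (d, some p) =
        ((pvACnt p (pvSeqOf segs) d).1, some (pvACnt p (pvSeqOf segs) d).2) := by
  induction segs with
  | nil => intro d p; rfl
  | cons seg rest ih =>
    intro d p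
    by_cases h : pvSpk seg = "Unknown"
    · rw [List.foldl_cons, pvAStep_eq, if_pos h, pvSeqOf_cons_unknown h]
      exact ih d p
    · rw [List.foldl_cons, pvAStep_eq, if_neg h, pvSeqOf_cons_known h]
      exact ih _ (pvSpk seg)

lemma pvA_fold_none (segs : List (List (String × String))) :
    ∀ (d : PySem.Dict String (PySem.Dict String Int)),
      segs.foldl pvAStep (d, none) =
        (match pvSeqOf segs with
         | [] => (d, none)
         | s :: rest => ((pvACnt s rest d).1, some (pvACnt s rest d).2)) := by
  induction segs with
  | nil => intro d; rfl
  | cons seg rest ih =>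
    intro d
    by_cases h : pvSpk seg = "Unknown"
    · rw [List.foldl_cons, pvAStep_eq, if_pos h, pvSeqOf_cons_unknown h]
      exact ih d
    · rw [List.foldl_cons, pvAStep_eq, if_neg h, pvSeqOf_cons_known h]
      exact pvA_fold_some rest d (pvSpk seg)

lemma pvDNext_filter (L : List String) :
    pvDNextKnownNonempty (L.filter (fun s => s != "Unknown")) = pvDNextKnownNonempty L := by
  induction L with
  | nil => rfl
  | cons b r ih =>
    by_cases h : b = "Unknown"
    · simp [h, pvDNextKnownNonempty, ih]
    · simp [h, pvDNextKnownNonempty]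

lemma pvDBad_filter (L : List String) :
    pvDBad (L.filter (fun s => s != "Unknown")) = pvDBad L := by
  induction L with
  | nil => rfl
  | cons a r ih =>
    by_cases h : a = "Unknown"
    · simp [h, pvDBad, ih]
    · simp [h, pvDBad, ih, pvDNext_filter]

-- outside the bad pattern the two guards agree, so A's loop equals the incremental counter
lemma pvACnt_eq_pvBCnt (l : List String) :
    ∀ (p : String) (d : PySem.Dict String (PySem.Dict String Int)),
      (∀ x ∈ l, x ≠ "Unknown") → pvDBad (p :: l) = false →
      (pvACnt p l d).1 = pvBCnt p l d := by
  induction l with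
  | nil => intro p d _ _; rfl
  | cons c rest ih =>
    intro p d hu hb
    have hnext : pvDNextKnownNonempty (c :: rest) = (c != "") := by
      have hc : c ≠ "Unknown" := hu c (by simp)
      simp [pvDNextKnownNonempty, hc]
    rw [pvDBad, pvDBad, hnext] at hb
    have hrest : pvDBad (c :: rest) = false := by
      rcases Bool.or_eq_false_iff.mp hb with ⟨_, h2⟩; exact h2
    have hfirst : (p == "" && c != "") = false := by
      exact (Bool.or_eq_false_iff.mp hb).1
    have hguard : (if p ≠ "" ∧ p ≠ c then pvBump d p c else d) =
        (if p ≠ c then pvBump d p c else d) := by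
      by_cases hpc : p = c
      · simp [hpc]
      · have hp : p ≠ "" := by
          intro hpe
          rcases Bool.and_eq_false_iff.mp hfirst with h | h
          · simp [hpe] at h
          · exact hpc (by simpa [hpe] using (by simpa using h : c = ""))
        simp [hpc, hp]
    rw [pvACnt, pvBCnt, hguard]
    exact ih c _ (fun x hx => hu x (by simp [hx])) hrest

lemma pvBCnt_no_unknown (l : List String) :
    ∀ (p : String) (d : PySem.Dict String (PySem.Dict String Int)),
      p ≠ "Unknown" → (∀ x ∈ l, x ≠ "Unknown") → d.get? "Unknown" = none →
      (pvBCnt p l d).get? "Unknown" = none := by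
  induction l with
  | nil => intro p d _ _ hd; exact hd
  | cons c rest ih =>
    intro p d hp hu hd
    rw [pvBCnt]
    refine ih c _ (hu c (by simp)) (fun x hx => hu x (by simp [hx])) ?_
    by_cases hpc : p ≠ c
    · rw [if_pos hpc]
      show ((d.insert p _).get? "Unknown") = none
      rw [PySem.Dict.get?_insert_of_ne _ _ (fun h => hp h.symm)]
      exact hd
    · rw [if_neg hpc]; exact hd

lemma pvSeqOf_eq_filter_map (segs : List (List (String × String))) :
    pvSeqOf segs = (segs.map pvSpk).filter (fun s => s != "Unknown") := by
  rw [pvSeqOf, List.filter_map]; rfl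

lemma pvSeqOf_no_unknown (segs : List (List (String × String))) :
    ∀ x ∈ pvSeqOf segs, x ≠ "Unknown" := by
  intro x hx
  rw [pvSeqOf_eq_filter_map] at hx
  simpa using (List.mem_filter.mp hx).2

-- the incremental counter over labels is the bump-fold over the differing adjacent pairs
lemma pvBCnt_eq_foldl (l : List String) :
    ∀ (p : String) (d : PySem.Dict String (PySem.Dict String Int)),
      pvBCnt p l d = (pvDiffPairs (p :: l)).foldl pvBumpE d := by
  induction l with
  | nil => intro p d; rfl
  | cons c rest ih =>
    intro p d
    have hdp : pvDiffPairs (p :: c :: rest) =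
        (if (p != c) = true then [(p, c)] else []) ++ pvDiffPairs (c :: rest) := by
      by_cases h : p = c <;> simp [pvDiffPairs, h]
    rw [pvBCnt, hdp, List.foldl_append, ih]
    by_cases h : p = c
    · simp [h]
    · simp [h, pvBumpE]

-- the zip of consecutive runs is exactly the differing adjacent pairs
lemma pvRuns_edges (l : List String) :
    (pvRunsOf l).zip ((pvRunsOf l).drop 1) = pvDiffPairs l := by
  induction l with
  | nil => rfl
  | cons a t ih =>
    cases t with
    | nil => rfl
    | cons b r =>
      by_cases h : a = b
      · have h1 : pvDiffPairs (a :: b :: r) = pvDiffPairs (b :: r) := by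
          simp [pvDiffPairs, h]
        have h2 : pvRunsOf (a :: b :: r) = pvRunsOf (b :: r) := by
          subst h
          simp [pvRunsOf, pvDiffPairs]
        rw [h1, h2, ih]
      · have h1 : pvDiffPairs (a :: b :: r) = (a, b) :: pvDiffPairs (b :: r) := by
          simp [pvDiffPairs, h]
        have h2 : pvRunsOf (a :: b :: r) = a :: pvRunsOf (b :: r) := by
          simp [pvRunsOf, pvDiffPairs, h]
        rw [h1, h2]
        have h3 : pvRunsOf (b :: r) = b :: (pvDiffPairs (b :: r)).map (·.2) := by
          simp [pvRunsOf]
        rw [h3] at ih ⊢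
        simpa using ih

-- SIMULATION: the bump-fold (incremental counts) equals the assignment fold (final totals)
lemma pvSim (v : String × String → Int) (L : List (String × String)) :
    ∀ (d₁ d₂ : PySem.Dict String (PySem.Dict String Int)),
      d₁.keys = d₂.keys →
      d₁.keys.Nodup →
      (∀ p, (d₁.getD p PySem.Dict.empty).keys = (d₂.getD p PySem.Dict.empty).keys) →
      (∀ p, (d₁.getD p PySem.Dict.empty).keys.Nodup) →
      (∀ p c, c ∈ (d₁.getD p PySem.Dict.empty).keys →
        (d₂.getD p PySem.Dict.empty).getD c 0 =
          (d₁.getD p PySem.Dict.empty).getD c 0 + (L.count (p, c) : Int)) →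
      (∀ e ∈ L, v e = (d₁.getD e.1 PySem.Dict.empty).getD e.2 0 + (L.count e : Int)) →
      L.foldl pvBumpE d₁ = L.foldl (pvAsgF v) d₂ := by
  induction L with
  | nil =>
    intro d₁ d₂ h1 h2 h3 h4 h5 _
    simp only [List.foldl_nil]
    apply PySem.Dict.ext
    rw [PySem.Dict.items_eq_map_keys d₁ h2 PySem.Dict.empty,
        PySem.Dict.items_eq_map_keys d₂ (h1 ▸ h2) PySem.Dict.empty, ← h1]
    apply List.map_congr_left
    intro p _
    have hpv : d₁.getD p PySem.Dict.empty = d₂.getD p PySem.Dict.empty := by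
      apply PySem.Dict.ext
      rw [PySem.Dict.items_eq_map_keys _ (h4 p) 0,
          PySem.Dict.items_eq_map_keys _ ((h3 p) ▸ h4 p) 0, ← h3 p]
      apply List.map_congr_left
      intro c hc
      have := h5 p c hc
      simp only [List.count_nil, Nat.cast_zero, add_zero] at this
      rw [this]
    rw [hpv]
  | cons e rest ih =>
    obtain ⟨e1, e2⟩ := e
    intro d₁ d₂ h1 h2 h3 h4 h5 h6
    simp only [List.foldl_cons]
    have hbump : pvBumpE d₁ (e1, e2) =
        d₁.insert e1 ((d₁.getD e1 PySem.Dict.empty).insert e2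
          ((d₁.getD e1 PySem.Dict.empty).getD e2 0 + 1)) := rfl
    have hasg : pvAsgF v d₂ (e1, e2) =
        d₂.insert e1 ((d₂.getD e1 PySem.Dict.empty).insert e2 (v (e1, e2))) := rfl
    rw [hbump, hasg]
    apply ih
    · -- outer keys stay equal
      by_cases hc : d₁.contains e1 = true
      · rw [PySem.Dict.keys_insert_of_contains _ _ hc,
            PySem.Dict.keys_insert_of_contains _ _ (by
              rw [PySem.Dict.contains_eq_decide_mem_keys, ← h1,
                ← PySem.Dict.contains_eq_decide_mem_keys]; exact hc), h1]
      · have hc' : d₂.contains e1 = false := by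
          rw [PySem.Dict.contains_eq_decide_mem_keys, ← h1,
            ← PySem.Dict.contains_eq_decide_mem_keys]
          simpa using hc
        rw [PySem.Dict.keys_insert_of_not_contains _ _ (by simpa using hc),
            PySem.Dict.keys_insert_of_not_contains _ _ hc', h1]
    · exact PySem.Dict.nodup_keys_insert _ _ _ h2
    · -- inner keys stay equal
      intro p
      by_cases hp : p = e1
      · rw [hp, PySem.Dict.getD_insert_self, PySem.Dict.getD_insert_self]
        by_cases hc : (d₁.getD e1 PySem.Dict.empty).contains e2 = true
        · rw [PySem.Dict.keys_insert_of_contains _ _ hc,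
              PySem.Dict.keys_insert_of_contains _ _ (by
                rw [PySem.Dict.contains_eq_decide_mem_keys, ← h3 e1,
                  ← PySem.Dict.contains_eq_decide_mem_keys]; exact hc), h3 e1]
        · have hc' : (d₂.getD e1 PySem.Dict.empty).contains e2 = false := by
            rw [PySem.Dict.contains_eq_decide_mem_keys, ← h3 e1,
              ← PySem.Dict.contains_eq_decide_mem_keys]
            simpa using hc
          rw [PySem.Dict.keys_insert_of_not_contains _ _ (by simpa using hc),
              PySem.Dict.keys_insert_of_not_contains _ _ hc', h3 e1]
      · rw [PySem.Dict.getD_insert_of_ne _ _ _ hp, PySem.Dict.getD_insert_of_ne _ _ _ hp]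
        exact h3 p
    · intro p
      by_cases hp : p = e1
      · rw [hp, PySem.Dict.getD_insert_self]
        exact PySem.Dict.nodup_keys_insert _ _ _ (h4 e1)
      · rw [PySem.Dict.getD_insert_of_ne _ _ _ hp]
        exact h4 p
    · -- values: B's assigned total = A's running count + remaining occurrences
      intro p c hcmem
      by_cases hp : p = e1
      · rw [hp] at hcmem ⊢
        rw [PySem.Dict.getD_insert_self] at hcmem
        rw [PySem.Dict.getD_insert_self, PySem.Dict.getD_insert_self]
        by_cases hc2 : c = e2
        · rw [hc2, PySem.Dict.getD_insert_self, PySem.Dict.getD_insert_self]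
          have h6e := h6 (e1, e2) (by simp)
          have hcnt : ((e1, e2) :: rest).count (e1, e2) = rest.count (e1, e2) + 1 :=
            List.count_cons_self
          rw [hcnt] at h6e
          rw [h6e]
          push_cast
          ring
        · rw [PySem.Dict.getD_insert_of_ne _ _ _ hc2, PySem.Dict.getD_insert_of_ne _ _ _ hc2]
          have hmem' : c ∈ (d₁.getD e1 PySem.Dict.empty).keys := by
            rcases (PySem.Dict.mem_keys_insert _ _ _ _).mp hcmem with h | h
            · exact absurd h hc2
            · exact h
          have hcnt : ((e1, e2) :: rest).count (e1, c) = rest.count (e1, c) :=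
            List.count_cons_of_ne (fun h => hc2 (congrArg Prod.snd h).symm)
          rw [← hcnt]
          exact h5 e1 c hmem'
      · rw [PySem.Dict.getD_insert_of_ne _ _ _ hp] at hcmem
        rw [PySem.Dict.getD_insert_of_ne _ _ _ hp, PySem.Dict.getD_insert_of_ne _ _ _ hp]
        have hcnt : ((e1, e2) :: rest).count (p, c) = rest.count (p, c) :=
          List.count_cons_of_ne (fun h => hp (congrArg Prod.fst h).symm)
        rw [← hcnt]
        exact h5 p c hcmem
    · -- v stays one step ahead of the running count
      intro f hf
      obtain ⟨f1, f2⟩ := f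
      have h6f := h6 (f1, f2) (by simp [hf])
      by_cases hfe : (f1, f2) = (e1, e2)
      · have hfe1 : f1 = e1 := congrArg Prod.fst hfe
        have hfe2 : f2 = e2 := congrArg Prod.snd hfe
        rw [hfe1, hfe2] at h6f ⊢
        rw [PySem.Dict.getD_insert_self, PySem.Dict.getD_insert_self]
        have hcnt : ((e1, e2) :: rest).count (e1, e2) = rest.count (e1, e2) + 1 :=
          List.count_cons_self
        rw [hcnt] at h6f
        rw [h6f]
        push_cast
        ring
      · have hcnt : ((e1, e2) :: rest).count (f1, f2) = rest.count (f1, f2) :=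
          List.count_cons_of_ne (Ne.symm hfe)
        rw [hcnt] at h6f
        rw [h6f]
        by_cases hp : f1 = e1
        · have h2ne : f2 ≠ e2 := by
            intro h2
            exact hfe (by rw [hp, h2])
          rw [hp, PySem.Dict.getD_insert_self, PySem.Dict.getD_insert_of_ne _ _ _ h2ne]
        · rw [PySem.Dict.getD_insert_of_ne _ _ _ hp]

-- if the bad '' pattern occurs, some edge out of '' exists
lemma pvMem_diff_of_bad (l : List String) :
    ∀ (p : String), (∀ x ∈ l, x ≠ "Unknown") → pvDBad (p :: l) = true →
      "" ∈ (pvDiffPairs (p :: l)).map (·.1) := by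
  induction l with
  | nil => intro p _ hb; simp [pvDBad, pvDNextKnownNonempty] at hb
  | cons c r ih =>
    intro p hu hb
    have hnext : pvDNextKnownNonempty (c :: r) = (c != "") := by
      have hc : c ≠ "Unknown" := hu c (by simp)
      simp [pvDNextKnownNonempty, hc]
    rw [pvDBad, hnext] at hb
    rcases Bool.or_eq_true_iff.mp hb with h1 | h2
    · have hp : p = "" := by simpa using (Bool.and_eq_true_iff.mp h1).1
      have hc : c ≠ "" := by simpa using (Bool.and_eq_true_iff.mp h1).2
      have hpc : p ≠ c := by rw [hp]; exact fun h => hc h.symm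
      have hdp : pvDiffPairs (p :: c :: r) = (p, c) :: pvDiffPairs (c :: r) := by
        simp [pvDiffPairs, hpc]
      rw [hdp]
      simp [hp]
    · have hmem := ih c (fun x hx => hu x (by simp [hx])) h2
      by_cases hpc : p = c
      · have hdp : pvDiffPairs (p :: c :: r) = pvDiffPairs (c :: r) := by
          simp [pvDiffPairs, hpc]
        rw [hdp]; exact hmem
      · have hdp : pvDiffPairs (p :: c :: r) = (p, c) :: pvDiffPairs (c :: r) := by
          simp [pvDiffPairs, hpc]
        rw [hdp]
        simpa using Or.inr (by simpa using hmem)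

lemma pvACnt_get_empty (l : List String) :
    ∀ (p : String) (d : PySem.Dict String (PySem.Dict String Int)),
      d.get? "" = none → ((pvACnt p l d).1).get? "" = none := by
  induction l with
  | nil => intro p d hd; exact hd
  | cons c rest ih =>
    intro p d hd
    rw [pvACnt]
    refine ih c _ ?_
    by_cases hg : p ≠ "" ∧ p ≠ c
    · rw [if_pos hg]
      show ((d.insert p _).get? "") = none
      rw [PySem.Dict.get?_insert_of_ne _ _ (fun h => hg.1 h.symm)]
      exact hd
    · rw [if_neg hg]; exact hd

lemma pvAsg_keys (v : String × String → Int) (L : List (String × String)) :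
    (L.foldl (pvAsgF v) PySem.Dict.empty).keys = PySem.Set.ofList (L.map (fun e => e.1)) := by
  have h := PySem.Dict.keys_foldl_insert_key L (fun e : String × String => e.1)
    (fun d e => (d.getD e.1 PySem.Dict.empty).insert e.2 (v e)) PySem.Dict.empty
  rw [PySem.Dict.keys_empty, PySem.Set.update_nil_left] at h
  exact h

-- B's dict for the label sequence p :: rest (proof-side name for what the port computes)
def pvBDict (s : List String) : PySem.Dict String (PySem.Dict String Int) :=
  (pvDiffPairs s).foldl (pvAsgF (fun e => (PySem.Dict.counter (pvDiffPairs s)).getD e 0))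
    PySem.Dict.empty

lemma pvBCnt_eq_pvBDict (s : List String) (p : String) (rest : List String)
    (hs : s = p :: rest) : pvBCnt p rest PySem.Dict.empty = pvBDict s := by
  rw [pvBDict, hs, pvBCnt_eq_foldl]
  apply pvSim
  · simp
  · simp
  · intro q; rfl
  · intro q; simp [PySem.Dict.getD_empty]
  · intro q c hc; simp [PySem.Dict.getD_empty] at hc
  · intro e _
    rw [PySem.Dict.getD_counter]
    simp [PySem.Dict.getD_empty]

-- ===== VERDICT =====
theorem calculate_interruption_frequency_spec : Claim_unchanged_calculate_interruption_frequency := by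
  intro dc _ hpre
  unfold Spec_calculate_interruption_frequency
  intro hnD
  obtain ⟨segs, hseg⟩ := Option.isSome_iff_exists.mp hpre
  have hbad : pvDBad (segs.map pvSpk) = false := by
    unfold D_calculate_interruption_frequency at hnD
    have hfind := hseg
    rw [pvDGet_eq_find? dc "segments"] at hfind
    obtain ⟨kv, hkv, hkv2⟩ := Option.map_eq_some_iff.mp hfind
    rw [Bool.eq_false_iff]
    intro hb
    refine hnD ⟨kv, by simp [hkv], ?_⟩
    rw [pvMapLookup_eq]
    have := (pvDBad_iff (segs.map pvSpk)).mp hb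
    simpa [hkv2] using this
  have hbadSeq : pvDBad (pvSeqOf segs) = false := by
    rw [pvSeqOf_eq_filter_map, pvDBad_filter]; exact hbad
  show calculate_interruption_frequency dc = calculate_interruption_frequency_alt dc
  unfold calculate_interruption_frequency calculate_interruption_frequency_alt
  rw [hseg]
  have hseqB : (segs.map (fun seg => (PySem.Dict.mk seg).getD "speaker" "Unknown")).filter
      (fun s => s != "Unknown") = pvSeqOf segs := by
    rw [pvSeqOf_eq_filter_map]
    congr 1
  simp only [hseqB, pvA_fold_none segs PySem.Dict.empty]
  have hruns : (pvRunsOf (pvSeqOf segs)).zip ((pvRunsOf (pvSeqOf segs)).drop 1) =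
      pvDiffPairs (pvSeqOf segs) := pvRuns_edges _
  rw [show ((pvSeqOf segs).take 1 ++ (((pvSeqOf segs).zip ((pvSeqOf segs).drop 1)).filter
      (fun e => e.1 != e.2)).map (·.2)) = pvRunsOf (pvSeqOf segs) from rfl, hruns]
  match hs : pvSeqOf segs with
  | [] => rfl
  | p :: rest =>
    have hup : p ≠ "Unknown" := pvSeqOf_no_unknown segs p (by rw [hs]; simp)
    have hur : ∀ x ∈ rest, x ≠ "Unknown" := fun x hx =>
      pvSeqOf_no_unknown segs x (by rw [hs]; simp [hx])
    have hab : (pvACnt p rest PySem.Dict.empty).1 = pvBCnt p rest PySem.Dict.empty := by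
      refine pvACnt_eq_pvBCnt rest p _ hur ?_
      rw [← hs]; exact hbadSeq
    have hB := pvBCnt_eq_pvBDict (p :: rest) p rest rfl
    have hnu : (pvBCnt p rest PySem.Dict.empty).get? "Unknown" = none :=
      pvBCnt_no_unknown rest p _ hup hur rfl
    rw [hab, hnu]
    rw [hB]
    rfl

theorem calculate_interruption_frequency_changed : Claim_changed_calculate_interruption_frequency := by
  unfold Claim_changed_calculate_interruption_frequency; decide

theorem calculate_interruption_frequency_tight : Claim_exact_calculate_interruption_frequency := by
  intro dc _ hpre hD hEq
  obtain ⟨segs, hseg⟩ := Option.isSome_iff_exists.mp hpre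
  have hfind := hseg
  rw [pvDGet_eq_find? dc "segments"] at hfind
  obtain ⟨kv, hkv, hkv2⟩ := Option.map_eq_some_iff.mp hfind
  obtain ⟨kv', hkv', hy⟩ := hD
  have hkvq : kv' = kv := by rw [hkv] at hkv'; exact (by simpa using hkv' : kv = kv').symm
  rw [pvMapLookup_eq] at hy
  have hbadL : pvDBad (segs.map pvSpk) = true := by
    refine (pvDBad_iff _).mpr ?_
    rw [← hkv2]
    exact hkvq ▸ hy
  have hbadSeq : pvDBad (pvSeqOf segs) = true := by
    rw [pvSeqOf_eq_filter_map, pvDBad_filter]; exact hbadL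
  unfold calculate_interruption_frequency calculate_interruption_frequency_alt at hEq
  rw [hseg] at hEq
  have hseqB : (segs.map (fun seg => (PySem.Dict.mk seg).getD "speaker" "Unknown")).filter
      (fun s => s != "Unknown") = pvSeqOf segs := by
    rw [pvSeqOf_eq_filter_map]
    congr 1
  simp only [hseqB, pvA_fold_none segs PySem.Dict.empty] at hEq
  have hruns : (pvRunsOf (pvSeqOf segs)).zip ((pvRunsOf (pvSeqOf segs)).drop 1) =
      pvDiffPairs (pvSeqOf segs) := pvRuns_edges _
  rw [show ((pvSeqOf segs).take 1 ++ (((pvSeqOf segs).zip ((pvSeqOf segs).drop 1)).filter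
      (fun e => e.1 != e.2)).map (·.2)) = pvRunsOf (pvSeqOf segs) from rfl] at hEq
  rw [hruns] at hEq
  match hs : pvSeqOf segs with
  | [] => rw [hs] at hbadSeq; simp [pvDBad] at hbadSeq
  | p :: rest =>
    rw [hs] at hEq hbadSeq
    have hur : ∀ x ∈ rest, x ≠ "Unknown" := fun x hx =>
      pvSeqOf_no_unknown segs x (by rw [hs]; simp [hx])
    have haemp : ((pvACnt p rest PySem.Dict.empty).1).get? "" = none :=
      pvACnt_get_empty rest p PySem.Dict.empty rfl
    have hakeys : "" ∉ ((pvACnt p rest PySem.Dict.empty).1).keys :=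
      (PySem.Dict.get?_eq_none_iff_not_mem_keys _ _).mp haemp
    -- B's result has '' among its outer keys
    have hbkey : "" ∈ (pvBDict (p :: rest)).keys := by
      have hmem : "" ∈ (pvDiffPairs (p :: rest)).map (·.1) :=
        pvMem_diff_of_bad rest p hur hbadSeq
      rw [pvBDict, pvAsg_keys]
      exact (PySem.Set.mem_ofList _ _).mpr hmem
    rw [show (pvDiffPairs (p :: rest)).foldl
        (fun d e => d.insert e.1 ((d.getD e.1 PySem.Dict.empty).insert e.2
          ((PySem.Dict.counter (pvDiffPairs (p :: rest))).getD e 0)))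
        PySem.Dict.empty = pvBDict (p :: rest) from rfl] at hEq
    cases h : ((pvACnt p rest PySem.Dict.empty).1).get? "Unknown" with
    | none =>
      rw [h] at hEq
      have hkeys := congrArg (List.map Prod.fst) hEq
      simp only [List.map_map] at hkeys
      have : ((pvACnt p rest PySem.Dict.empty).1).keys = (pvBDict (p :: rest)).keys := by
        simpa [PySem.Dict.keys, Function.comp] using hkeys
      rw [this] at hakeys
      exact hakeys hbkey
    | some u =>
      rw [h] at hEq
      have hc : ((pvACnt p rest PySem.Dict.empty).1).contains "Unknown" = true := by
        rw [PySem.Dict.contains_eq_isSome_get?, h]; rfl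
      have hkeys := congrArg (List.map Prod.fst) hEq
      simp only [List.map_map] at hkeys
      have : (((pvACnt p rest PySem.Dict.empty).1).insert "Unknown" u).keys =
          (pvBDict (p :: rest)).keys := by
        simpa [PySem.Dict.keys, Function.comp] using hkeys
      rw [PySem.Dict.keys_insert_of_contains _ u hc] at this
      rw [this] at hakeys
      exact hakeys hbkey
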